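-- pv_equiv track=rewrite | github.com/cba-git/opvc-kit | src/opvc/step3.py | _merge_indices_to_segments
-- ===== SOURCE A (Python) =====
-- from typing import Any, Dict, Iterable, List, Optional, Tuple, Union
--
-- def _merge_indices_to_segments(idxs_1based: List[int]) -> List[Tuple[int, int]]:
--     """Given sorted 1-based indices, merge contiguous ones into (s,e) segments."""
--     if not idxs_1based:
--         return []
--     idxs = sorted(set(int(i) for i in idxs_1based))
--     segs: List[Tuple[int, int]] = []
--     s = e = idxs[0]
--     for i in idxs[1:]:
--         if i == e + 1:
--             e = i
--         else:
--             segs.append((s, e))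
--             s = e = i
--     segs.append((s, e))
--     return segs
-- ===== SOURCE B (Python) =====
-- def _merge_indices_to_segments(idxs_1based):
--     """Group-by-offset: after dedup+sort, entries of one maximal consecutive run
--     share the same key value - position; each run yields one (first, last) segment."""
--     idxs = sorted(set(int(i) for i in idxs_1based))
--     pairs = list(enumerate(idxs))
--     n = len(pairs)
--     segs = []
--     j = 0
--     while j < n:
--         key = pairs[j][1] - pairs[j][0]
--         k = j + 1
--         while k < n and pairs[k][1] - pairs[k][0] == key:
--             k += 1
--         segs.append((pairs[j][1], pairs[k - 1][1]))
--         j = k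
--     return segs
-- ===== Notes on version B (the rewrite author's own statement) =====
-- stated objective: idiomatic
-- what changed: Replaces A's running-(s,e)-with-flush state machine by a group-by-offset decomposition: enumerate the sorted deduped indices, split into maximal groups sharing the key value-position, and emit (first,last) of each group.
import Mathlib
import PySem

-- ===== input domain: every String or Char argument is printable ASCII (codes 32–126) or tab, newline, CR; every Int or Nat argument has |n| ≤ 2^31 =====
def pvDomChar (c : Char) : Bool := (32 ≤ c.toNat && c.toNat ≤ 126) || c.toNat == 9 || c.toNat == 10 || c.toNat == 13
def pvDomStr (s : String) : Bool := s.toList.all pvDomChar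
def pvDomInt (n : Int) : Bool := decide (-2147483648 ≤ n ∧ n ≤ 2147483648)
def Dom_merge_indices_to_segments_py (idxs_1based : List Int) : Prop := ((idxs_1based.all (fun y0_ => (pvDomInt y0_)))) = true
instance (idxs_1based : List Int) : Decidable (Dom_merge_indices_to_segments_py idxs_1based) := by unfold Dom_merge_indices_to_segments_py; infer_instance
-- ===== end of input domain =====

-- B replaces A's running-(s,e) flush loop by a group-by-offset decomposition (idiomatic; same cost).
-- ===== PORT A =====
-- A's for-loop over idxs[1:] with state (segs, s, e)
def pvALoop (segs : List (Int × Int)) (s e : Int) : List Int → List (Int × Int)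
  | [] => segs ++ [(s, e)]
  | i :: rest =>
      if i = e + 1 then pvALoop segs s i rest
      else pvALoop (segs ++ [(s, e)]) i i rest

def merge_indices_to_segments_py (idxs_1based : List Int) : List (Int × Int) :=
  if idxs_1based = [] then []
  else
    match PySem.List.sorted (PySem.Set.ofList idxs_1based) (fun x => x) false with
    | [] => []   -- unreachable: sorted(set(xs)) of nonempty xs is nonempty
    | x :: rest => pvALoop [] x x rest

-- ===== PORT B =====
-- inner while: collect the prefix of `pairs` whose key p.2 - p.1 equals `key`, return (run, rest)
def pvBSpan (key : Int) : List (Int × Int) → List (Int × Int) × List (Int × Int)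
  | [] => ([], [])
  | q :: rest =>
      if q.2 - q.1 = key then
        let p := pvBSpan key rest
        (q :: p.1, p.2)
      else ([], q :: rest)

theorem pvBSpan_snd_length (key : Int) (l : List (Int × Int)) :
    (pvBSpan key l).2.length ≤ l.length := by
  induction l with
  | nil => simp [pvBSpan]
  | cons q rest ih =>
      simp only [pvBSpan]
      split
      · simpa using Nat.le_succ_of_le ih
      · simp

-- outer while: one segment (first value, last value of the run) per maximal group
def pvBGroups : List (Int × Int) → List (Int × Int)
  | [] => []
  | p :: rest =>
      let sp := pvBSpan (p.2 - p.1) rest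
      (p.2, (sp.1.getLastD p).2) :: pvBGroups sp.2
termination_by l => l.length
decreasing_by
  simpa using Nat.lt_succ_of_le (pvBSpan_snd_length (p.2 - p.1) rest)

def merge_indices_to_segments_py_alt (idxs_1based : List Int) : List (Int × Int) :=
  pvBGroups (PySem.List.enumerate
    (PySem.List.sorted (PySem.Set.ofList idxs_1based) (fun x => x) false))

-- ===== PRECONDITION & SPEC =====
def Spec_merge_indices_to_segments_py (idxs_1based : List Int) (out : List (Int × Int)) : Prop := out = merge_indices_to_segments_py_alt idxs_1based
instance (idxs_1based : List Int) (out : List (Int × Int)) : Decidable (Spec_merge_indices_to_segments_py idxs_1based out) := by unfold Spec_merge_indices_to_segments_py; infer_instance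

-- ===== CLAIM (what is proved, stated in full; the proofs are below) =====
def Claim_equal_merge_indices_to_segments_py : Prop := ∀ (idxs_1based : List Int), Dom_merge_indices_to_segments_py idxs_1based → Spec_merge_indices_to_segments_py idxs_1based (merge_indices_to_segments_py idxs_1based)

-- ===== LEMMAS AND PROOFS =====

-- ===== VERDICT (by name: the statement is the Claim_ definition above) =====
theorem pvGetLastD_cons' {α : Type} (a d : α) (l : List α) :
    (a :: l).getLast?.getD d = l.getLast?.getD a := by
  cases l with
  | nil => rfl
  | cons b bs =>
      rw [List.getLast?_cons_cons]
      cases hb : (b :: bs).getLast? with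
      | none => simp at hb
      | some v => rfl

-- Main bridge: A's flush loop over values equals B's grouping of the enumerated suffix,
-- for ANY value list (no sortedness needed: both flush exactly when the next value ≠ prev + 1).
theorem pvLoop_eq_groups (vs : List Int) (k s e : Int) (segs : List (Int × Int)) :
    pvALoop segs s e vs =
      segs ++ ((fun sp => (s, ((sp.1 : List (Int × Int)).getLastD (k, e)).2) :: pvBGroups sp.2)
        (pvBSpan (e - k) (PySem.List.enumerate vs (k + 1)))) := by
  induction vs generalizing k s e segs with
  | nil => simp [pvALoop, pvBSpan, pvBGroups, PySem.List.enumerate_nil]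
  | cons i tl ih =>
      rw [PySem.List.enumerate_cons]
      by_cases h : i = e + 1
      · have hkey : (i : Int) - (k + 1) = e - k := by omega
        simp only [pvALoop, pvBSpan, if_pos h, hkey]
        rw [ih (k + 1) s i segs, hkey]
        simp [pvGetLastD_cons']
      · have hkey : ¬ ((i : Int) - (k + 1) = e - k) := by omega
        simp only [pvALoop, pvBSpan, if_neg h, if_neg hkey]
        rw [ih (k + 1) i i (segs ++ [(s, e)])]
        simp [pvBGroups, List.append_assoc]

theorem merge_indices_to_segments_py_spec : Claim_equal_merge_indices_to_segments_py := by
  intro idxs _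
  unfold Spec_merge_indices_to_segments_py merge_indices_to_segments_py merge_indices_to_segments_py_alt
  by_cases h : idxs = []
  · subst h
    have hnil : PySem.List.sorted ([] : List Int) (fun x => x) false = [] := by
      rw [PySem.List.sorted_eq_nil_iff]
    simp [hnil, PySem.Set.ofList, PySem.List.enumerate_nil, pvBGroups]
  · rw [if_neg h]
    rcases hs : PySem.List.sorted (PySem.Set.ofList idxs) (fun x => x) false with _ | ⟨x, rest⟩
    · exfalso
      rw [PySem.List.sorted_eq_nil_iff] at hs
      rcases idxs with _ | ⟨y, ys⟩
      · exact h rfl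
      · have hy : y ∈ PySem.Set.ofList (y :: ys) := by
          rw [PySem.Set.mem_ofList]; exact List.mem_cons_self
        rw [hs] at hy
        simp at hy
    · show pvALoop [] x x rest = _
      rw [PySem.List.enumerate_cons, pvLoop_eq_groups rest 0 x x []]
      simp [pvBGroups]
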